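-- pv_equiv track=rewrite | github.com/hbazille/project_euler | 215.py | __generate
-- ===== SOURCE A (Python) =====
-- def __generate(x):
--     if x < 0:
--         return []
--     elif x == 0:
--         return [0]
--     else:
--         gen2 = generate(x - 2)
--         gen3 = generate(x - 3)
--         return [(x << 2) | 2 for x in gen2] + [(x << 3) | 4 for x in gen3]
--
-- def generate(x):
--     l = 1
--     for _ in range(x - 2):
--         l = (l << 1) | 1
--     return [x & l for x in __generate(x)]
-- ===== SOURCE B (Python) =====
-- # Bottom-up rolling DP instead of A's branching mutual recursion (each generate(i) built once).
-- def __generate(x):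
--     # Bottom-up rolling DP: builds generate(0)..generate(x-2) once each instead of
--     # the exponentially branching mutual recursion; keeps only the last three lists
--     # and a rolling mask.
--     if x < 0:
--         return []
--     if x == 0:
--         return [0]
--     gm3, gm2, gm1 = [], [], []
--     m = 1
--     for i in range(0, x - 1):
--         if i >= 3:
--             m = (m << 1) | 1
--         raw = [0] if i == 0 else [(v << 2) | 2 for v in gm2] + [(v << 3) | 4 for v in gm3]
--         gm3, gm2, gm1 = gm2, gm1, [v & m for v in raw]
--     return [(v << 2) | 2 for v in gm1] + [(v << 3) | 4 for v in gm2]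
-- ===== Notes on version B (the rewrite author's own statement) =====
-- stated objective: alternative
-- what changed: Replaces the exponentially branching mutual recursion (__generate/generate) by a single bottom-up loop that builds each generate(i) once, keeping only the last three lists and a rolling mask.
import Mathlib
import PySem

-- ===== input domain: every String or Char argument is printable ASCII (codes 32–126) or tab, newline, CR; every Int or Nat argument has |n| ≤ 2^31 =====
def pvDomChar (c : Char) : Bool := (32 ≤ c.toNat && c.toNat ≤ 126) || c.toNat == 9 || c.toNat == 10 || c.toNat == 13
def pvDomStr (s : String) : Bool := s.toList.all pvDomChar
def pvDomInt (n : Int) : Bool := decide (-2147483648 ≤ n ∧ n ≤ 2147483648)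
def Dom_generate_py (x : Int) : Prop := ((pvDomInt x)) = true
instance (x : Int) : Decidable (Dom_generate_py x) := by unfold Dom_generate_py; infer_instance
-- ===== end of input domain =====

-- B replaces A's exponentially branching mutual recursion by a single bottom-up
-- pass keeping the last three generate-lists and a rolling mask (alternative
-- decomposition: each generate(i) is built once instead of once per call path).

-- ===== PORT A =====
mutual
-- Python __generate
def generate_py (x : Int) : List Int :=
  if x < 0 then []
  else if x = 0 then [0]
  else
    let gen2 := pvGenA (x - 2)
    let gen3 := pvGenA (x - 3)
    gen2.map (fun (v : Int) => PySem.Int.bor (v <<< (2:Nat)) 2) ++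
      gen3.map (fun (v : Int) => PySem.Int.bor (v <<< (3:Nat)) 4)
  termination_by (2 * x.toNat, 0)
  decreasing_by all_goals omega

-- Python generate (helper of __generate)
def pvGenA (x : Int) : List Int :=
  let l := (PySem.List.pyRange 0 (x - 2) 1).foldl (fun l _ => PySem.Int.bor (l <<< (1:Nat)) 1) 1
  (generate_py x).map (fun (v : Int) => PySem.Int.band v l)
  termination_by (2 * x.toNat, 1)
  decreasing_by all_goals omega
end

-- ===== PORT B =====
def generate_py_alt (x : Int) : List Int :=
  if x < 0 then []
  else if x = 0 then [0]
  else
    let s := (PySem.List.pyRange 0 (x - 1) 1).foldl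
      (fun (s : (List Int × List Int × List Int) × Int) i =>
        let gm3 := s.1.1
        let gm2 := s.1.2.1
        let gm1 := s.1.2.2
        let m := if 3 ≤ i then PySem.Int.bor (s.2 <<< (1:Nat)) 1 else s.2
        let raw := if i = 0 then [0] else
          gm2.map (fun (v : Int) => PySem.Int.bor (v <<< (2:Nat)) 2) ++
            gm3.map (fun (v : Int) => PySem.Int.bor (v <<< (3:Nat)) 4)
        ((gm2, gm1, raw.map (fun (v : Int) => PySem.Int.band v m)), m))
      (([], [], []), 1)
    s.1.2.2.map (fun (v : Int) => PySem.Int.bor (v <<< (2:Nat)) 2) ++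
      s.1.2.1.map (fun (v : Int) => PySem.Int.bor (v <<< (3:Nat)) 4)

-- ===== PRECONDITION & SPEC =====
def Spec_generate_py (x : Int) (out : List Int) : Prop := out = generate_py_alt x
instance (x : Int) (out : List Int) : Decidable (Spec_generate_py x out) := by unfold Spec_generate_py; infer_instance

-- ===== CLAIM (what is proved, stated in full; the proofs are below) =====
def Claim_equal_generate_py : Prop := ∀ (x : Int), Dom_generate_py x → Spec_generate_py x (generate_py x)

-- ===== LEMMAS AND PROOFS =====

-- the mask-update step shared by both ports
def pvStep (l : Int) : Int := PySem.Int.bor (l <<< (1:Nat)) 1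

lemma pvFoldConst (xs : List Int) (a : Int) :
    xs.foldl (fun l _ => PySem.Int.bor (l <<< (1:Nat)) 1) a = pvStep^[xs.length] a := by
  induction xs generalizing a with
  | nil => rfl
  | cons y ys ih => simp [List.foldl, ih, Function.iterate_succ_apply, pvStep]

lemma pvGenA_eq (x : Int) :
    pvGenA x = (generate_py x).map (fun (v : Int) => PySem.Int.band v (pvStep^[(x - 2).toNat] 1)) := by
  rw [pvGenA]
  simp [pvFoldConst, PySem.List.length_pyRange_one]

lemma pvGenA_neg (x : Int) (h : x < 0) : pvGenA x = [] := by
  rw [pvGenA_eq, generate_py]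
  simp [h]

-- loop invariant of B's fold
lemma pvInv (n : Nat) :
    (PySem.List.pyRange 0 (n : Int) 1).foldl
      (fun (s : (List Int × List Int × List Int) × Int) i =>
        let gm3 := s.1.1
        let gm2 := s.1.2.1
        let gm1 := s.1.2.2
        let m := if 3 ≤ i then PySem.Int.bor (s.2 <<< (1:Nat)) 1 else s.2
        let raw := if i = 0 then [0] else
          gm2.map (fun (v : Int) => PySem.Int.bor (v <<< (2:Nat)) 2) ++
            gm3.map (fun (v : Int) => PySem.Int.bor (v <<< (3:Nat)) 4)
        ((gm2, gm1, raw.map (fun (v : Int) => PySem.Int.band v m)), m))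
      (([], [], []), 1)
    = ((pvGenA ((n : Int) - 3), pvGenA ((n : Int) - 2), pvGenA ((n : Int) - 1)),
        pvStep^[n - 3] 1) := by
  induction n with
  | zero =>
      norm_num [pvGenA_neg]
  | succ n ih =>
      rw [show ((n + 1 : Nat) : Int) = (n : Int) + 1 by push_cast; ring,
          PySem.List.pyRange_one_succ_right (Int.natCast_nonneg n),
          List.foldl_append, ih]
      simp only [List.foldl]
      have e1 : ((n : Int) + 1 - 3) = (n : Int) - 2 := by ring
      have e2 : ((n : Int) + 1 - 2) = (n : Int) - 1 := by ring
      have e3 : ((n : Int) + 1 - 1) = (n : Int) := by ring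
      rw [e1, e2, e3]
      have hm : (if 3 ≤ (n : Int) then PySem.Int.bor (pvStep^[n - 3] 1 <<< (1:Nat)) 1
          else pvStep^[n - 3] 1) = pvStep^[n + 1 - 3] 1 := by
        by_cases h : 3 ≤ n
        · rw [if_pos (by exact_mod_cast h), show n + 1 - 3 = (n - 3) + 1 from by omega,
            Function.iterate_succ_apply']
          rfl
        · rw [if_neg (by exact_mod_cast h), show n + 1 - 3 = n - 3 from by omega]
      rw [hm]
      refine Prod.ext (Prod.ext rfl (Prod.ext rfl ?_)) rfl
      rw [pvGenA_eq ((n : Nat) : Int), show ((n : Int) - 2).toNat = n + 1 - 3 from by omega, generate_py]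
      by_cases h0 : n = 0
      · subst h0; norm_num
      · have hne : ((n : Int)) ≠ 0 := Int.natCast_ne_zero.mpr h0
        have hnn : ¬ ((n : Int) < 0) := by omega
        simp only [if_neg hne, if_neg hnn]

-- ===== VERDICT (by name: the statement is the Claim_ definition above) =====
theorem generate_py_spec : Claim_equal_generate_py := by
  intro x _
  unfold Spec_generate_py
  rw [generate_py, generate_py_alt]
  by_cases hneg : x < 0
  · simp [hneg]
  · by_cases h0 : x = 0
    · simp [h0]
    · rw [if_neg hneg, if_neg h0, if_neg hneg, if_neg h0]
      have hn : ((x - 1).toNat : Int) = x - 1 := by omega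
      have hinv := pvInv (x - 1).toNat
      rw [hn] at hinv
      simp only [hinv, show x - 1 - 1 = x - 2 from by ring,
        show x - 1 - 2 = x - 3 from by ring]
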